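-- pv_equiv track=rewrite | github.com/LtGlahn/fiksnvdb_sep2020 | nvdbutilities.py | bevartBKverdier
-- ===== SOURCE A (Python) =====
-- def bevartBKverdier( gammelbk, nybk ):
--     """
--     Sammenligner dictionary med nytt forslag BK-verdier med det gamle
--
--     Vil ignorere strekningsbeskrivelse og en del andre mindre viktige ting...
--
--     ARGUMENTS
--         gammelbk, nybk : string eller dictionary på formen { "egenskapTypeId" : "verdi" }
--
--     KEYWORDS
--         None
--
--     RETURNS
--         True eller False
--     """
--
--     # 905 BK uoff
--     # [{10902: 'Bruksklasse'},
--     # {10908: 'Bruksklasse vinter'},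
--     # {10914: 'Maks vogntoglengde'},
--     # {10920: 'Strekningsbeskrivelse'}, IGNORER
--     # {10927: 'Maks totalvekt kjøretøy, skiltet'}, IGNORER
--     # {10928: 'Maks totalvekt vogntog, skiltet'}, IGNORER
--     # {11010: 'Merknad'}]
--
--     # Har vi fått tomme data?
--     if not gammelbk or not nybk:
--         return False
--
--     ignorer = [ 10920, 10927, 10928, # 905 BK normal, uoff
--                 10916, 10918 # Strekningsbeskrivelser 901 tømmer og 903 spesial
--                  ]
--
--     s_ignorer = set( ignorer )
--
--     gmlKey = set( gammelbk.keys())  - s_ignorer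
--     nyKey  = set( nybk.keys())      - s_ignorer
--
--     if gmlKey != nyKey:
--         return False
--
--     else:
--         for akey in gmlKey:
--             if gammelbk[akey] != nybk[akey]:
--                 return False
--
--     return True
-- ===== SOURCE B (Python) =====
-- def bevartBKverdier(gammelbk, nybk):
--     if not gammelbk or not nybk:
--         return False
--     ignorer = {10920, 10927, 10928, 10916, 10918}
--     filtered_gammel = {k: v for k, v in gammelbk.items() if k not in ignorer}
--     filtered_ny = {k: v for k, v in nybk.items() if k not in ignorer}
--     return filtered_gammel == filtered_ny
-- ===== Notes on version B (the rewrite author's own statement) =====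
-- stated objective: simpler
-- what changed: Replaces A's key-set difference, set-equality test and explicit value-comparison loop by two dict comprehensions that drop the ignored keys followed by a single dict equality.
import Mathlib
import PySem

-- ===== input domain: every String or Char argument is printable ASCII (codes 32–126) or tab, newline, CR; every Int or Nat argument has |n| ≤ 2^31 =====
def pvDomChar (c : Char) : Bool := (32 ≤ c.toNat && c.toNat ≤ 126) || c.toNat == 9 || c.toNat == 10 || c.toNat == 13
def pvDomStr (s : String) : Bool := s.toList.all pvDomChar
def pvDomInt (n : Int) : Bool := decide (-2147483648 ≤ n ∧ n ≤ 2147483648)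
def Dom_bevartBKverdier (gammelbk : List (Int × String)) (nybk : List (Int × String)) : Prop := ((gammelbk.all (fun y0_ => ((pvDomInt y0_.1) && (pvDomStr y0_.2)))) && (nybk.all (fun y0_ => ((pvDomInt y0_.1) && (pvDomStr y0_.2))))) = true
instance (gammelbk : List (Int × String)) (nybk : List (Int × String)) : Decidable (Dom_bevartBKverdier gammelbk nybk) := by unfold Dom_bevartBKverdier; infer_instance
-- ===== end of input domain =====

-- B replaces A's key-set difference + set-equality + explicit value loop by two filtering
-- dict comprehensions followed by a single (order-insensitive) dict equality; outputs are identical.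
-- Dicts are association lists; both ports first build the PySem.Dict the Python function receives.

-- ===== PORT A =====
def bevartBKverdier (gammelbk : List (Int × String)) (nybk : List (Int × String)) : Bool :=
  let gd := PySem.Dict.ofList gammelbk
  let nd := PySem.Dict.ofList nybk
  -- if not gammelbk or not nybk: return False
  if gd.size == 0 || nd.size == 0 then false
  else
    let ignorer : List Int := [10920, 10927, 10928, 10916, 10918]
    let s_ignorer : PySem.Set Int := PySem.Set.ofList ignorer
    let gmlKey : PySem.Set Int := PySem.Set.diff (PySem.Set.ofList gd.keys) s_ignorer
    let nyKey : PySem.Set Int := PySem.Set.diff (PySem.Set.ofList nd.keys) s_ignorer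
    if !(PySem.Set.equal gmlKey nyKey) then false
    else
      -- for akey in gmlKey: if gammelbk[akey] != nybk[akey]: return False  (order-independent)
      gmlKey.all (fun akey => gd.get? akey == nd.get? akey)

-- ===== PORT B =====
def bevartBKverdier_alt (gammelbk : List (Int × String)) (nybk : List (Int × String)) : Bool :=
  let gd := PySem.Dict.ofList gammelbk
  let nd := PySem.Dict.ofList nybk
  if gd.size == 0 || nd.size == 0 then false
  else
    let ignorer : PySem.Set Int := PySem.Set.ofList [10920, 10927, 10928, 10916, 10918]
    let filteredGammel := PySem.Dict.ofList (gd.items.filter (fun p => !(PySem.Set.contains ignorer p.1)))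
    let filteredNy := PySem.Dict.ofList (nd.items.filter (fun p => !(PySem.Set.contains ignorer p.1)))
    -- Python dict ==: same key set, same value at every key
    PySem.Set.equal (PySem.Set.ofList filteredGammel.keys) (PySem.Set.ofList filteredNy.keys) &&
      filteredGammel.keys.all (fun k => filteredGammel.get? k == filteredNy.get? k)

-- ===== PRECONDITION & SPEC =====
def Spec_bevartBKverdier (gammelbk : List (Int × String)) (nybk : List (Int × String)) (out : Bool) : Prop := out = bevartBKverdier_alt gammelbk nybk
instance (gammelbk : List (Int × String)) (nybk : List (Int × String)) (out : Bool) : Decidable (Spec_bevartBKverdier gammelbk nybk out) := by unfold Spec_bevartBKverdier; infer_instance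

-- ===== CLAIM (what is proved, stated in full; the proofs are below) =====
def Claim_equal_bevartBKverdier : Prop := ∀ (gammelbk : List (Int × String)) (nybk : List (Int × String)), Dom_bevartBKverdier gammelbk nybk → Spec_bevartBKverdier gammelbk nybk (bevartBKverdier gammelbk nybk)

-- ===== LEMMAS AND PROOFS =====

theorem ofList_items_nodup (l : List (Int × String)) (h : (l.map Prod.fst).Nodup) :
    (PySem.Dict.ofList l).items = l := by
  have hc : ∀ a ∈ l, (PySem.Dict.empty : PySem.Dict Int String).contains (Prod.fst a) = (false : Bool) := by
    intro a _; simp [pysem]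
  have := PySem.Dict.items_foldl_insert_fresh l Prod.fst Prod.snd PySem.Dict.empty hc h
  simpa using this

theorem map_fst_filter (c : Int → Bool) (l : List (Int × String)) :
    (l.filter (fun q => c q.1)).map Prod.fst = (l.map Prod.fst).filter c := by
  induction l with
  | nil => rfl
  | cons a t ih => by_cases h : c a.1 <;> simp [h, ih]

theorem items_filtered (d : PySem.Dict Int String) (ign : PySem.Set Int) (hnd : d.keys.Nodup) :
    (PySem.Dict.ofList (d.items.filter (fun q => !(PySem.Set.contains ign q.1)))).items
      = d.items.filter (fun q => !(PySem.Set.contains ign q.1)) := by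
  apply ofList_items_nodup
  have hsub : ((d.items.filter (fun q => !(PySem.Set.contains ign q.1))).map Prod.fst).Sublist
      (d.items.map Prod.fst) := List.filter_sublist.map _
  exact (show (d.items.map Prod.fst).Nodup from hnd).sublist hsub

theorem keys_filtered (d : PySem.Dict Int String) (ign : PySem.Set Int) (hnd : d.keys.Nodup) :
    (PySem.Dict.ofList (d.items.filter (fun q => !(PySem.Set.contains ign q.1)))).keys
      = d.keys.filter (fun k => !(PySem.Set.contains ign k)) := by
  show (PySem.Dict.ofList (d.items.filter (fun q => !(PySem.Set.contains ign q.1)))).items.map Prod.fst = _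
  rw [items_filtered d ign hnd]
  exact map_fst_filter (fun k => !(PySem.Set.contains ign k)) d.items

theorem get?_filtered (d : PySem.Dict Int String) (ign : PySem.Set Int) (k : Int)
    (hnd : d.keys.Nodup) (hkeep : PySem.Set.contains ign k = false) :
    (PySem.Dict.ofList (d.items.filter (fun q => !(PySem.Set.contains ign q.1)))).get? k = d.get? k := by
  have hndf := PySem.Dict.nodup_keys_ofList (d.items.filter (fun q => !(PySem.Set.contains ign q.1)))
  cases hv : d.get? k with
  | some v =>
      have hm : (k, v) ∈ d.items := PySem.Dict.mem_items_of_get?_eq_some _ hv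
      have hmf : (k, v) ∈ (PySem.Dict.ofList (d.items.filter (fun q => !(PySem.Set.contains ign q.1)))).items := by
        rw [items_filtered d ign hnd]
        exact List.mem_filter.2 ⟨hm, by simpa using hkeep⟩
      exact PySem.Dict.get?_of_mem_items _ hmf hndf
  | none =>
      have hk : k ∉ d.keys := (PySem.Dict.get?_eq_none_iff_not_mem_keys _ _).1 hv
      apply (PySem.Dict.get?_eq_none_iff_not_mem_keys _ _).2
      rw [keys_filtered d ign hnd]
      intro hmem
      exact hk (List.mem_filter.1 hmem).1

theorem all_congr_mem {l : List Int} {f g : Int → Bool} (h : ∀ x ∈ l, f x = g x) :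
    l.all f = l.all g := by
  induction l with
  | nil => rfl
  | cons a t ih =>
      simp only [List.all_cons, h a (List.mem_cons_self), ih (fun x hx => h x (List.mem_cons_of_mem a hx))]

theorem ab_eq (g n : List (Int × String)) : bevartBKverdier g n = bevartBKverdier_alt g n := by
  unfold bevartBKverdier bevartBKverdier_alt
  by_cases hguard : ((PySem.Dict.ofList g).size == 0 || (PySem.Dict.ofList n).size == 0) = true
  · simp only [hguard, if_true]
  · simp only [hguard, Bool.not_eq_true] at *
    set gd := PySem.Dict.ofList g with hgd
    set nd := PySem.Dict.ofList n with hnd2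
    have hgnd : gd.keys.Nodup := PySem.Dict.nodup_keys_ofList g
    have hnnd : nd.keys.Nodup := PySem.Dict.nodup_keys_ofList n
    set ign : PySem.Set Int := PySem.Set.ofList [10920, 10927, 10928, 10916, 10918] with hign
    have hofg : PySem.Set.ofList gd.keys = gd.keys := PySem.Set.ofList_eq_self_of_nodup _ hgnd
    have hofn : PySem.Set.ofList nd.keys = nd.keys := PySem.Set.ofList_eq_self_of_nodup _ hnnd
    have hdiffg : PySem.Set.diff (PySem.Set.ofList gd.keys) ign = gd.keys.filter (fun k => !(PySem.Set.contains ign k)) := by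
      rw [hofg]; rfl
    have hdiffn : PySem.Set.diff (PySem.Set.ofList nd.keys) ign = nd.keys.filter (fun k => !(PySem.Set.contains ign k)) := by
      rw [hofn]; rfl
    have hkg := keys_filtered gd ign hgnd
    have hkn := keys_filtered nd ign hnnd
    have hofkg : PySem.Set.ofList (PySem.Dict.ofList (gd.items.filter (fun q => !(PySem.Set.contains ign q.1)))).keys
        = gd.keys.filter (fun k => !(PySem.Set.contains ign k)) := by
      rw [hkg]; exact PySem.Set.ofList_eq_self_of_nodup _ (hgnd.filter _)
    have hofkn : PySem.Set.ofList (PySem.Dict.ofList (nd.items.filter (fun q => !(PySem.Set.contains ign q.1)))).keys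
        = nd.keys.filter (fun k => !(PySem.Set.contains ign k)) := by
      rw [hkn]; exact PySem.Set.ofList_eq_self_of_nodup _ (hnnd.filter _)
    rw [hdiffg, hdiffn, hofkg, hofkn]
    simp only [Bool.false_eq_true, if_false]
    by_cases he : PySem.Set.equal (gd.keys.filter (fun k => !(PySem.Set.contains ign k))) (nd.keys.filter (fun k => !(PySem.Set.contains ign k))) = true
    · rw [he]
      simp only [Bool.not_true, Bool.false_eq_true, if_false, Bool.true_and]
      rw [hkg]
      apply all_congr_mem
      intro k hk
      have hkf : PySem.Set.contains ign k = false := by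
        have := (List.mem_filter.1 hk).2
        simpa using this
      rw [get?_filtered gd ign k hgnd hkf, get?_filtered nd ign k hnnd hkf]
    · have hef : PySem.Set.equal (gd.keys.filter (fun k => !(PySem.Set.contains ign k))) (nd.keys.filter (fun k => !(PySem.Set.contains ign k))) = false :=
        Bool.eq_false_iff.mpr he
      rw [hef]
      simp

-- ===== VERDICT (by name: the statement is the Claim_ definition above) =====
theorem bevartBKverdier_spec : Claim_equal_bevartBKverdier := by
  intro g n _
  unfold Spec_bevartBKverdier
  exact ab_eq g n
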